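-- pv_equiv track=rewrite | github.com/Yuhengli77/Decode-Free-Information-Extraction | main/index_extractor.py | _expand_intervals_to_ids
-- ===== SOURCE A (Python) =====
-- from typing import Any, Dict, List, Optional, Sequence, Tuple
--
-- def _expand_intervals_to_ids(
--     intervals: Sequence[Sequence[Any]],
--     available_ids: Sequence[int],
-- ) -> List[int]:
--     available_set = {int(block_id) for block_id in available_ids}
--     selected_ids: List[int] = []
--     seen = set()
--
--     for interval in intervals:
--         if not isinstance(interval, (list, tuple)) or len(interval) != 2:
--             continue
--         try:
--             start = int(interval[0])
--             end = int(interval[1])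
--         except (TypeError, ValueError):
--             continue
--
--         if start > end:
--             start, end = end, start
--
--         for block_id in range(start, end + 1):
--             if block_id in available_set and block_id not in seen:
--                 selected_ids.append(block_id)
--                 seen.add(block_id)
--
--     return selected_ids
-- ===== SOURCE B (Python) =====
-- from bisect import bisect_left, bisect_right
-- from typing import Any, List, Optional, Sequence, Tuple
--
--
-- def _bounds(interval: Any) -> Optional[Tuple[int, int]]:
--     if not isinstance(interval, (list, tuple)) or len(interval) != 2:
--         return None
--     try:
--         lo = int(interval[0])
--         hi = int(interval[1])
--     except (TypeError, ValueError):
--         return None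
--     return (hi, lo) if lo > hi else (lo, hi)
--
--
-- def _expand_intervals_to_ids(
--     intervals: Sequence[Sequence[Any]],
--     available_ids: Sequence[int],
-- ) -> List[int]:
--     sorted_ids = sorted({int(block_id) for block_id in available_ids})
--
--     def matches(interval: Any) -> List[int]:
--         b = _bounds(interval)
--         if b is None:
--             return []
--         return sorted_ids[bisect_left(sorted_ids, b[0]):bisect_right(sorted_ids, b[1])]
--
--     hits = [block_id for interval in intervals for block_id in matches(interval)]
--     return list(dict.fromkeys(hits))
-- ===== Notes on version B (the rewrite author's own statement) =====
-- stated objective: alternative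
-- what changed: B works in staged passes instead of A's single fold with a running seen-set: it sorts the deduplicated available ids once, maps every interval to its bisected slice of matching ids, concatenates the slices, and deduplicates at the end with dict.fromkeys; per-interval work no longer depends on the interval's integer width.
import Mathlib
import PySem

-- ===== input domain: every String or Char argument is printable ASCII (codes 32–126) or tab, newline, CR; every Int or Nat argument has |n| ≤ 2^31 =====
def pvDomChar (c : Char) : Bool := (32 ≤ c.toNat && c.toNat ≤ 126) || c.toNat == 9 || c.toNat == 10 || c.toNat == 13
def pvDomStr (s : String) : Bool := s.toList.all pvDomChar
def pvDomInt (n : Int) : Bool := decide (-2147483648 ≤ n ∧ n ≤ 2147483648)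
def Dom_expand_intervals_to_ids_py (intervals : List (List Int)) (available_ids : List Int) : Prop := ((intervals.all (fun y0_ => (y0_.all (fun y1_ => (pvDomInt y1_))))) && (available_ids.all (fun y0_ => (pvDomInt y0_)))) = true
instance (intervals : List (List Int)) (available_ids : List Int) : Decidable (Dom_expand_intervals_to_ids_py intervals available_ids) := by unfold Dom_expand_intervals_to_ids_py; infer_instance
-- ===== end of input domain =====

-- B replaces A's single fold (running seen-set, full integer-range scan per interval) by staged
-- passes: sort the deduplicated ids, flat-map every interval to its bisected slice, dedup at the end
-- (objective: alternative algorithm, width-independent per-interval work).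

-- ===== PORT A =====
-- one iteration of A's outer loop: scan range(start, end+1) against the available set
def pvAStep (availableSet : PySem.Set Int) (st : List Int × PySem.Set Int)
    (interval : List Int) : List Int × PySem.Set Int :=
  match interval with
  | [a, b] =>
    let se := if a > b then (b, a) else (a, b)
    (PySem.List.pyRange se.1 (se.2 + 1) 1).foldl
      (fun st blockId =>
        if PySem.Set.contains availableSet blockId && !(PySem.Set.contains st.2 blockId) then
          (st.1 ++ [blockId], PySem.Set.add st.2 blockId)
        else st) st
  | _ => st

def expand_intervals_to_ids_py (intervals : List (List Int)) (available_ids : List Int) : List Int :=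
  (intervals.foldl (pvAStep (PySem.Set.ofList available_ids))
    (([], PySem.Set.empty) : List Int × PySem.Set Int)).1

-- ===== PORT B =====
-- _bounds + matches: the interval's bisected slice of the sorted ids ([] for a skipped interval)
def pvBounds (interval : List Int) : Option (Int × Int) :=
  match interval with
  | [a, b] => some (if a > b then (b, a) else (a, b))
  | _ => none

def pvMatches (sortedIds : List Int) (interval : List Int) : List Int :=
  match pvBounds interval with
  | none => []
  | some b =>
    PySem.List.slice sortedIds (some ((PySem.List.bisectLeft sortedIds b.1 : Nat) : Int))
      (some ((PySem.List.bisectRight sortedIds b.2 : Nat) : Int))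

def expand_intervals_to_ids_py_alt (intervals : List (List Int)) (available_ids : List Int) : List Int :=
  PySem.List.dedup
    (intervals.flatMap
      (pvMatches (PySem.List.sorted (PySem.Set.ofList available_ids) (fun x => x))))

-- ===== PRECONDITION & SPEC =====
def Spec_expand_intervals_to_ids_py (intervals : List (List Int)) (available_ids : List Int) (out : List Int) : Prop := out = expand_intervals_to_ids_py_alt intervals available_ids
instance (intervals : List (List Int)) (available_ids : List Int) (out : List Int) : Decidable (Spec_expand_intervals_to_ids_py intervals available_ids out) := by unfold Spec_expand_intervals_to_ids_py; infer_instance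

-- ===== CLAIM (what is proved, stated in full; the proofs are below) =====
def Claim_equal_expand_intervals_to_ids_py : Prop := ∀ (intervals : List (List Int)) (available_ids : List Int), Dom_expand_intervals_to_ids_py intervals available_ids → Spec_expand_intervals_to_ids_py intervals available_ids (expand_intervals_to_ids_py intervals available_ids)

-- ===== LEMMAS AND PROOFS =====

-- the seen-set push used to characterise A's inner loop
def pvSeenPush (st : List Int × PySem.Set Int) (x : Int) : List Int × PySem.Set Int :=
  if !(PySem.Set.contains st.2 x) then (st.1 ++ [x], PySem.Set.add st.2 x) else st

-- folding a function that ignores non-p elements equals folding over the filtered list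
theorem pv_foldl_eq_foldl_filter {α σ : Type} (p : α → Bool) (f : σ → α → σ)
    (hf : ∀ st x, p x = false → f st x = st) :
    ∀ (l : List α) (st : σ), l.foldl f st = (l.filter p).foldl f st := by
  intro l
  induction l with
  | nil => intro st; rfl
  | cons x t ih =>
    intro st
    cases hpx : p x with
    | false => simp [hpx, hf st x hpx, ih]
    | true => simp [hpx, ih]

-- two folds agree when the step functions agree on the list's elements
theorem pv_foldl_congr_mem {α σ : Type} (f g : σ → α → σ) :
    ∀ (l : List α) (st : σ), (∀ x ∈ l, ∀ s, f s x = g s x) → l.foldl f st = l.foldl g st := by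
  intro l
  induction l with
  | nil => intro st _; rfl
  | cons x t ih =>
    intro st h
    simp only [List.foldl_cons]
    rw [h x (by simp)]
    exact ih _ (fun y hy s => h y (by simp [hy]) s)

-- two strictly increasing lists with the same members are equal
theorem pv_eq_of_pairwise_lt : ∀ (l₁ l₂ : List Int), l₁.Pairwise (· < ·) → l₂.Pairwise (· < ·) →
    (∀ x, x ∈ l₁ ↔ x ∈ l₂) → l₁ = l₂ := by
  intro l₁
  induction l₁ with
  | nil =>
    intro l₂ _ _ hm
    cases l₂ with
    | nil => rfl
    | cons b u => exact absurd ((hm b).2 (by simp)) (by simp)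
  | cons a t ih =>
    intro l₂ h₁ h₂ hm
    cases l₂ with
    | nil => exact absurd ((hm a).1 (by simp)) (by simp)
    | cons b u =>
      have ht : ∀ x ∈ t, a < x := fun x hx => List.rel_of_pairwise_cons h₁ hx
      have hu : ∀ x ∈ u, b < x := fun x hx => List.rel_of_pairwise_cons h₂ hx
      have hab : a = b := by
        have h1 : a ∈ b :: u := (hm a).1 (by simp)
        have h2 : b ∈ a :: t := (hm b).2 (by simp)
        rcases List.mem_cons.1 h1 with h | h
        · exact h
        · rcases List.mem_cons.1 h2 with h' | h'
          · exact h'.symm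
          · have := hu a h
            have := ht b h'
            omega
      subst hab
      have htu : ∀ x, x ∈ t ↔ x ∈ u := by
        intro x
        constructor
        · intro hx
          have hax := ht x hx
          rcases List.mem_cons.1 ((hm x).1 (List.mem_cons_of_mem _ hx)) with h | h
          · omega
          · exact h
        · intro hx
          have hax := hu x hx
          rcases List.mem_cons.1 ((hm x).2 (List.mem_cons_of_mem _ hx)) with h | h
          · omega
          · exact h
      rw [ih u h₁.of_cons h₂.of_cons htu]

-- membership in the bisected slice of a sorted list
theorem pv_mem_bisect_slice (xs : List Int) (hxs : xs.Pairwise (· ≤ ·)) (s e x : Int) :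
    x ∈ PySem.List.slice xs (some ((PySem.List.bisectLeft xs s : Nat) : Int))
          (some ((PySem.List.bisectRight xs e : Nat) : Int)) ↔ x ∈ xs ∧ s ≤ x ∧ x ≤ e := by
  obtain ⟨hblLen, hblL, hblR⟩ := PySem.List.bisectLeft_spec xs s hxs
  obtain ⟨hbrLen, hbrL, hbrR⟩ := PySem.List.bisectRight_spec xs e hxs
  rw [PySem.List.slice_natCast]
  constructor
  · intro hx
    obtain ⟨k, hk, hgk⟩ := List.mem_iff_getElem.1 hx
    have hk' := hk
    simp only [List.length_take, List.length_drop, lt_min_iff] at hk'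
    have hidx : PySem.List.bisectLeft xs s + k < xs.length := by omega
    have hxval : xs[PySem.List.bisectLeft xs s + k] = x := by
      rw [List.getElem_take, List.getElem_drop] at hgk
      exact hgk
    refine ⟨hxval ▸ List.getElem_mem hidx, ?_, ?_⟩
    · have := hblR (PySem.List.bisectLeft xs s + k) hidx (by omega)
      omega
    · have := hbrL (PySem.List.bisectLeft xs s + k) hidx (by omega)
      omega
  · rintro ⟨hx, hsx, hxe⟩
    obtain ⟨j, hj, hgj⟩ := List.mem_iff_getElem.1 hx
    have hjbl : PySem.List.bisectLeft xs s ≤ j := by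
      by_contra h
      push Not at h
      have := hblL j hj h
      omega
    have hjbr : j < PySem.List.bisectRight xs e := by
      by_contra h
      push Not at h
      have := hbrR j hj h
      omega
    refine List.mem_iff_getElem.2 ⟨j - PySem.List.bisectLeft xs s, ?_, ?_⟩
    · simp only [List.length_take, List.length_drop, lt_min_iff]
      omega
    · rw [List.getElem_take, List.getElem_drop]
      have : PySem.List.bisectLeft xs s + (j - PySem.List.bisectLeft xs s) = j := by omega
      simp only [this]
      exact hgj

-- A's step on an interval is the seen-push fold over B's slice for that interval
theorem pv_step_eq_matches (av : List Int) (st : List Int × PySem.Set Int)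
    (interval : List Int) :
    pvAStep (PySem.Set.ofList av) st interval =
    (pvMatches (PySem.List.sorted (PySem.Set.ofList av) (fun x => x)) interval).foldl
      pvSeenPush st := by
  match interval with
  | [] => rfl
  | [a] => rfl
  | a :: b :: c :: rest => rfl
  | [a, b] =>
    simp only [pvAStep, pvMatches, pvBounds]
    set S : PySem.Set Int := PySem.Set.ofList av with hS
    set sortedIds : List Int := PySem.List.sorted S (fun x => x) with hSI
    set se := if a > b then (b, a) else (a, b) with hse
    have hsorted_le : sortedIds.Pairwise (· ≤ ·) := PySem.List.sorted_pairwise S (fun x => x)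
    have hsorted_lt : sortedIds.Pairwise (· < ·) := PySem.List.sorted_ofList_pairwise_lt av
    -- step 1: A's fold over the range equals the fold over the range filtered to available ids
    rw [pv_foldl_eq_foldl_filter (fun x => PySem.Set.contains S x) _
      (by
        intro st x hx
        have h' : x ∉ S := by
          intro hm
          have hx' : S.contains x = false := hx
          rw [(PySem.Set.contains_iff S x).2 hm] at hx'
          cases hx'
        simp [h'])]
    -- step 2: on the filtered list the availability test is redundant: the step is pvSeenPush
    rw [pv_foldl_congr_mem _ pvSeenPush _ st
      (by
        intro x hx s
        have := (List.mem_filter.1 hx).2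
        simp only [pvSeenPush, this, Bool.true_and])]
    -- step 3: the filtered range IS the bisected slice of the sorted ids
    have heq : (PySem.List.pyRange se.1 (se.2 + 1) 1).filter (fun x => PySem.Set.contains S x) =
        PySem.List.slice sortedIds (some ((PySem.List.bisectLeft sortedIds se.1 : Nat) : Int))
          (some ((PySem.List.bisectRight sortedIds se.2 : Nat) : Int)) := by
      apply pv_eq_of_pairwise_lt
      · exact List.Pairwise.sublist List.filter_sublist (PySem.List.pairwise_lt_pyRange_one _ _)
      · have hsub : PySem.List.slice sortedIds
            (some ((PySem.List.bisectLeft sortedIds se.1 : Nat) : Int))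
            (some ((PySem.List.bisectRight sortedIds se.2 : Nat) : Int)) |>.Sublist sortedIds := by
          rw [PySem.List.slice_natCast]
          exact (List.take_sublist _ _).trans (List.drop_sublist _ _)
        exact List.Pairwise.sublist hsub hsorted_lt
      · intro x
        rw [List.mem_filter, PySem.List.mem_pyRange_one,
          pv_mem_bisect_slice sortedIds hsorted_le se.1 se.2 x]
        have hmem : x ∈ sortedIds ↔ x ∈ av := by
          rw [hSI, PySem.List.mem_sorted, hS, PySem.Set.mem_ofList]
        simp only [PySem.Set.contains_iff, hS, PySem.Set.mem_ofList] at *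
        constructor
        · rintro ⟨⟨h1, h2⟩, h3⟩
          exact ⟨hmem.2 h3, h1, by omega⟩
        · rintro ⟨h1, h2, h3⟩
          exact ⟨⟨h2, by omega⟩, hmem.1 h1⟩
    rw [heq]

-- folding per-interval folds equals one fold over the concatenation
theorem pv_foldl_foldl_eq_flatMap {α β σ : Type} (g : α → List β) (f : σ → β → σ) :
    ∀ (l : List α) (st : σ),
      l.foldl (fun st x => (g x).foldl f st) st = (l.flatMap g).foldl f st := by
  intro l
  induction l with
  | nil => intro st; rfl
  | cons x t ih => intro st; simp [List.flatMap_cons, List.foldl_append, ih]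

-- the seen-push fold from a synchronised state stays synchronised with Set.add
theorem pv_seenPush_sync : ∀ (xs : List Int) (s : PySem.Set Int),
    xs.foldl pvSeenPush (s, s) = (xs.foldl PySem.Set.add s, xs.foldl PySem.Set.add s) := by
  intro xs
  induction xs with
  | nil => intro s; rfl
  | cons x t ih =>
    intro s
    have hstep : pvSeenPush (s, s) x = (PySem.Set.add s x, PySem.Set.add s x) := by
      by_cases h : x ∈ s
      · simp [pvSeenPush, h, PySem.Set.add]
      · simp [pvSeenPush, h, PySem.Set.add]
    simp [hstep, ih]

-- the seen-push fold from the empty state computes the ordered dedup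
theorem pv_seenPush_dedup (xs : List Int) :
    (xs.foldl pvSeenPush (([], PySem.Set.empty) : List Int × PySem.Set Int)).1 =
    PySem.List.dedup xs := by
  have h0 : (([], PySem.Set.empty) : List Int × PySem.Set Int) =
      ((PySem.Set.empty : PySem.Set Int), (PySem.Set.empty : PySem.Set Int)) := rfl
  rw [h0, pv_seenPush_sync, PySem.List.dedup_eq_ofList, PySem.Set.ofList_eq_foldl]
  rfl

-- ===== VERDICT (by name: the statement is the Claim_ definition above) =====
theorem expand_intervals_to_ids_py_spec : Claim_equal_expand_intervals_to_ids_py := by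
  intro intervals available_ids _
  unfold Spec_expand_intervals_to_ids_py expand_intervals_to_ids_py expand_intervals_to_ids_py_alt
  rw [pv_foldl_congr_mem _
    (fun st iv =>
      (pvMatches (PySem.List.sorted (PySem.Set.ofList available_ids) (fun x => x)) iv).foldl
        pvSeenPush st)
    _ _ (fun iv _ s => pv_step_eq_matches available_ids s iv)]
  rw [pv_foldl_foldl_eq_flatMap, pv_seenPush_dedup]
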